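-- pv_equiv track=rewrite | github.com/dev-ro/machine-learning-projects | spellingbee.py | find_matching_words
-- ===== SOURCE A (Python) =====
-- def find_matching_words(characters, words):
--     matching_words = set()
--     words_set = set(words)  # Convert list to set for O(1) lookups
--     all_perms = set()  # To store unique permutations
--
--     def can_form_word(word, characters):
--         # Create a set of unique characters from the input for faster lookup
--         unique_chars = set(characters)
--
--         # Check if every character in the word is in the set of input characters
--         for letter in set(word):
--             if letter not in unique_chars:
--                 return False
--         return True
--
--     filtered_words = [
--         word
--         for word in words
--         if can_form_word(word, characters)
--     ]
--
--     # sort by length of word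
--     filtered_words.sort(key=len, reverse=True)
--     return filtered_words
-- ===== SOURCE B (Python) =====
-- def find_matching_words(characters, words):
--     # Bucket-by-length instead of comparison-sorting the words: group the
--     # matching words by length (encounter order preserved), then emit the
--     # groups for each distinct length in descending order.
--     allowed = set(characters)
--     filtered = [w for w in words if set(w) <= allowed]
--     lengths = sorted({len(w) for w in filtered}, reverse=True)
--     return [w for L in lengths for w in filtered if len(w) == L]
-- ===== Notes on version B (the rewrite author's own statement) =====
-- stated objective: faster
-- what changed: B builds the allowed-character set once (A rebuilds set(characters) inside can_form_word for every word) and replaces A's stable comparison sort of the words by bucketing: only the distinct lengths are sorted descending and the per-length groups are concatenated in encounter order.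
import Mathlib
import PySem

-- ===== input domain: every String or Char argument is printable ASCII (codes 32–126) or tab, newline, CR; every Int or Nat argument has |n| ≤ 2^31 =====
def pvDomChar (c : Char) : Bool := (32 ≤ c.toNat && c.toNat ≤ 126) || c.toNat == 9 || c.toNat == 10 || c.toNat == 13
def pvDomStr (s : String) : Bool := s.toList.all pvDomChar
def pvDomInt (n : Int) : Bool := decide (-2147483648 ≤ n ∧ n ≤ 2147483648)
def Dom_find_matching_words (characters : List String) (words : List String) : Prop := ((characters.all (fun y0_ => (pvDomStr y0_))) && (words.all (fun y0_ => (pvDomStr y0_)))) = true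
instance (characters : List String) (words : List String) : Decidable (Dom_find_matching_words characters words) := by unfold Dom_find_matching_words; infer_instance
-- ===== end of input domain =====

-- B replaces A's stable sort of the words by bucketing: sort only the distinct
-- lengths descending and concatenate the per-length groups in encounter order.
-- (A also builds two sets it never uses; they are kept as dead lets in the port.)

-- ===== PORT A =====
-- helper can_form_word: iterating set(word) and testing 'letter not in set(characters)'
-- is the order-independent Bool 'all', exact here
def pvCanFormWord (word : String) (characters : List String) : Bool :=
  let uniqueChars : PySem.Set String := PySem.Set.ofList characters
  (PySem.Set.ofList (word.toList.map (fun c => String.ofList [c]))).all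
    (fun letter => PySem.Set.contains uniqueChars letter)

def find_matching_words (characters : List String) (words : List String) : List String :=
  let _wordsSet : PySem.Set String := PySem.Set.ofList words  -- A builds it, never uses it
  let _allPerms : PySem.Set String := PySem.Set.empty          -- A builds it, never uses it
  let filteredWords := words.filter (fun word => pvCanFormWord word characters)
  PySem.List.sorted filteredWords (fun w => PySem.Str.len w) true

-- ===== PORT B =====
def find_matching_words_alt (characters : List String) (words : List String) : List String :=
  let allowed : PySem.Set String := PySem.Set.ofList characters
  let filtered := words.filter (fun w =>
    PySem.Set.issubset (PySem.Set.ofList (w.toList.map (fun c => String.ofList [c]))) allowed)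
  let lengths := PySem.List.sorted (PySem.Set.ofList (filtered.map PySem.Str.len)) (fun k => k) true
  lengths.flatMap (fun L => filtered.filter (fun w => PySem.Str.len w == L))

-- ===== PRECONDITION & SPEC =====
def Spec_find_matching_words (characters : List String) (words : List String) (out : List String) : Prop := out = find_matching_words_alt characters words
instance (characters : List String) (words : List String) (out : List String) : Decidable (Spec_find_matching_words characters words out) := by unfold Spec_find_matching_words; infer_instance

-- ===== CLAIM (what is proved, stated in full; the proofs are below) =====
def Claim_equal_find_matching_words : Prop := ∀ (characters : List String) (words : List String), Dom_find_matching_words characters words → Spec_find_matching_words characters words (find_matching_words characters words)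

-- ===== LEMMAS AND PROOFS =====

-- insertBy in front of a list every element of which compares 'before'
theorem pv_insertBy_all_before {α : Type} (before : α → α → Bool) (x : α) (l : List α)
    (h : ∀ y ∈ l, before x y = true) :
    PySem.List.insertBy before x l = x :: l := by
  cases l with
  | nil => rfl
  | cons a as => simp [PySem.List.insertBy, h a (by simp)]

-- insertBy skips a prefix none of whose elements compare 'before'
theorem pv_insertBy_append {α : Type} (before : α → α → Bool) (x : α) (as bs : List α)
    (h : ∀ a ∈ as, before x a = false) :
    PySem.List.insertBy before x (as ++ bs) = as ++ PySem.List.insertBy before x bs := by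
  induction as with
  | nil => rfl
  | cons a as ih =>
      simp only [List.cons_append, PySem.List.insertBy, h a (by simp)]
      simp only [Bool.false_eq_true, if_false, List.cons.injEq, true_and]
      exact ih (fun a ha => h a (by simp [ha]))

-- Inserting x into a descending-grouped list appends it to its key group
-- (creating the group at its descending position if absent).
theorem pv_ins_group (key : String → Int) (x : String) (K : List Int) (g : Int → List String)
    (hK : K.Pairwise (fun a b => b < a))
    (hg : ∀ k ∈ K, ∀ w ∈ g k, key w = k)
    (hx : key x ∉ K → g (key x) = []) :
    PySem.List.insertBy (fun a b => decide (key b < key a)) x (K.flatMap g)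
      = (if key x ∈ K then K
         else PySem.List.insertBy (fun a b : Int => decide (b < a)) (key x) K).flatMap
          (fun k => g k ++ List.filter (fun w => key w == k) [x]) := by
  induction K with
  | nil =>
      simp only [List.flatMap_nil, List.not_mem_nil, if_neg (fun h => h)]
      simp [PySem.List.insertBy, hx (by simp), List.filter]
  | cons k K' ih =>
      have hK' : K'.Pairwise (fun a b => b < a) := hK.tail
      have hkmax : ∀ j ∈ K', j < k := fun j hj => List.rel_of_pairwise_cons hK hj
      by_cases hlt : k < key x
      · -- key x bigger than every key: new group in front
        have hnot : key x ∉ k :: K' := by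
          intro hmem
          rcases List.mem_cons.mp hmem with h | h
          · omega
          · exact absurd (hkmax _ h) (by omega)
        have hall : ∀ y ∈ (k :: K').flatMap g, (fun a b => decide (key b < key a)) x y = true := by
          intro y hy
          rcases List.mem_flatMap.mp hy with ⟨j, hj, hyg⟩
          have hkey := hg j hj y hyg
          have hjk : j ≤ k := by
            rcases List.mem_cons.mp hj with h | h
            · omega
            · exact le_of_lt (hkmax _ h)
          simp only [decide_eq_true_eq, hkey]; omega
        rw [pv_insertBy_all_before _ _ _ hall, if_neg hnot]
        rw [pv_insertBy_all_before (fun a b : Int => decide (b < a)) (key x) (k :: K')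
              (by intro y hy
                  rcases List.mem_cons.mp hy with h | h
                  · simp only [decide_eq_true_eq]; omega
                  · have := hkmax _ h; simp only [decide_eq_true_eq]; omega)]
        simp only [List.flatMap_cons, hx hnot, List.nil_append]
        have hfx : List.filter (fun w => key w == key x) [x] = [x] := by simp [List.filter]
        rw [hfx]
        congr 1
        have : ∀ j ∈ k :: K', g j ++ List.filter (fun w => key w == j) [x] = g j := by
          intro j hj
          have : j ≠ key x := fun h => hnot (h ▸ hj)
          simp [List.filter, beq_eq_false_iff_ne.mpr (Ne.symm this)]
        calc (k :: K').flatMap g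
            = (k :: K').flatMap (fun j => g j ++ List.filter (fun w => key w == j) [x]) := by
              apply List.flatMap_congr; intro j hj; exact (this j hj).symm
          _ = _ := rfl
      · -- key x ≤ k: skip the head group
        have hskip : ∀ a ∈ g k, (fun a b => decide (key b < key a)) x a = false := by
          intro a ha
          have := hg k (by simp) a ha
          simp only [decide_eq_false_iff_not, this]; omega
        simp only [List.flatMap_cons]
        rw [pv_insertBy_append _ _ _ _ hskip]
        by_cases hk : key x = k
        · -- x joins the head group, at its end
          have hall : ∀ y ∈ K'.flatMap g, (fun a b => decide (key b < key a)) x y = true := by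
            intro y hy
            rcases List.mem_flatMap.mp hy with ⟨j, hj, hyg⟩
            have := hg j (by simp [hj]) y hyg
            have := hkmax _ hj
            simp only [decide_eq_true_eq]; omega
          rw [pv_insertBy_all_before _ _ _ hall, if_pos (by simp [hk])]
          simp only [List.flatMap_cons]
          have hfk : List.filter (fun w => key w == k) [x] = [x] := by simp [List.filter, hk]
          rw [hfk]
          have : K'.flatMap (fun j => g j ++ List.filter (fun w => key w == j) [x]) = K'.flatMap g := by
            apply List.flatMap_congr; intro j hj
            have hjk := hkmax _ hj
            have : j ≠ key x := by omega
            simp [List.filter, beq_eq_false_iff_ne.mpr (Ne.symm this)]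
          rw [this]; simp
        · -- key x < k: recurse into the tail
          have hxlt : key x < k := by omega
          have hx' : key x ∉ K' → g (key x) = [] := by
            intro h; exact hx (by simp [hk, h])
          have hg' : ∀ j ∈ K', ∀ w ∈ g j, key w = j := fun j hj => hg j (by simp [hj])
          rw [ih hK' hg' hx']
          have hmem_iff : (key x ∈ k :: K') ↔ (key x ∈ K') := by simp [hk]
          have hfk : List.filter (fun w => key w == k) [x] = [] := by
            simp [List.filter, beq_eq_false_iff_ne.mpr hk]
          by_cases hm : key x ∈ K'
          · rw [if_pos hm, if_pos (hmem_iff.mpr hm)]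
            simp only [List.flatMap_cons, hfk, List.append_nil]
          · rw [if_neg hm, if_neg (fun h => hm (hmem_iff.mp h))]
            have : PySem.List.insertBy (fun a b : Int => decide (b < a)) (key x) (k :: K')
                = k :: PySem.List.insertBy (fun a b : Int => decide (b < a)) (key x) K' := by
              simp [PySem.List.insertBy, show ¬ (k < key x) by omega]
            rw [this]
            simp only [List.flatMap_cons, hfk, List.append_nil]

-- Stable descending sort by key = concatenation, over the distinct keys in
-- descending order, of the key-filtered sublists (in original order).
theorem pv_bridge (key : String → Int) (F : List String) :
    PySem.List.sorted F key true
      = (PySem.List.sorted (PySem.Set.ofList (F.map key)) (fun k => k) true).flatMap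
          (fun k => F.filter (fun w => key w == k)) := by
  induction F using List.reverseRecOn with
  | nil => simp [PySem.List.sorted_rev_eq_foldl_insertBy, PySem.Set.ofList]
  | append_singleton F x ih =>
      have hstep : PySem.List.sorted (F ++ [x]) key true
          = PySem.List.insertBy (fun a b => decide (key b < key a)) x (PySem.List.sorted F key true) := by
        rw [PySem.List.sorted_rev_eq_foldl_insertBy, PySem.List.sorted_rev_eq_foldl_insertBy,
            List.foldl_append]
        rfl
      rw [hstep, ih]
      set S : PySem.Set Int := PySem.Set.ofList (F.map key) with hS
      set K : List Int := PySem.List.sorted S (fun k => k) true with hKdef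
      have hKnodup : K.Nodup :=
        ((PySem.List.sorted_perm S (fun k => k) true).symm).nodup
          (PySem.Set.nodup_ofList (F.map key))
      have hKle : K.Pairwise (fun a b : Int => b ≤ a) := PySem.List.sorted_pairwise_rev S (fun k => k)
      have hK : K.Pairwise (fun a b : Int => b < a) :=
        (hKnodup.and hKle).imp (fun h => lt_of_le_of_ne h.2 (Ne.symm h.1))
      have hmemK : ∀ j : Int, j ∈ K ↔ j ∈ F.map key := by
        intro j
        rw [hKdef, PySem.List.mem_sorted, hS, PySem.Set.mem_ofList]
      have hg : ∀ j ∈ K, ∀ w ∈ F.filter (fun w => key w == j), key w = j := by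
        intro j _ w hw
        have := List.of_mem_filter hw
        exact beq_iff_eq.mp this
      have hx : key x ∉ K → F.filter (fun w => key w == key x) = [] := by
        intro h
        rw [List.filter_eq_nil_iff]
        intro w hw hbeq
        exact h ((hmemK (key x)).mpr (List.mem_map.mpr ⟨w, hw, beq_iff_eq.mp hbeq⟩))
      rw [pv_ins_group key x K (fun k => F.filter (fun w => key w == k)) hK hg hx]
      -- identify the new key list
      have hofL : PySem.Set.ofList ((F ++ [x]).map key) = PySem.Set.add S (key x) := by
        rw [List.map_append]
        show PySem.Set.ofList (F.map key ++ [key x]) = _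
        rw [PySem.Set.ofList_eq_foldl, List.foldl_append, ← PySem.Set.ofList_eq_foldl]
        rfl
      have hfilt : ∀ k : Int, (F ++ [x]).filter (fun w => key w == k)
          = F.filter (fun w => key w == k) ++ List.filter (fun w => key w == k) [x] := by
        intro k; rw [List.filter_append]
      by_cases hm : key x ∈ K
      · have hcont : PySem.Set.contains S (key x) = true := by
          have hmem : key x ∈ S := by
            rw [hS, PySem.Set.mem_ofList]; exact (hmemK _).mp hm
          exact List.elem_eq_true_of_mem hmem
        have hadd : PySem.Set.add S (key x) = S := by
          simp only [PySem.Set.add, hcont, if_true]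
        rw [if_pos hm, hofL, hadd, ← hKdef]
        apply List.flatMap_congr
        intro k _
        exact (hfilt k).symm
      · have hcont : PySem.Set.contains S (key x) = false := by
          have hmem : key x ∉ S := by
            rw [hS, PySem.Set.mem_ofList]; exact fun h => hm ((hmemK _).mpr h)
          exact Bool.eq_false_iff.mpr (fun hc => hmem (List.mem_of_elem_eq_true hc))
        have hadd : PySem.Set.add S (key x) = S ++ [key x] := by
          simp only [PySem.Set.add, hcont, Bool.false_eq_true, if_false]
        have hsortedadd : PySem.List.sorted (S ++ [key x]) (fun k : Int => k) true
            = PySem.List.insertBy (fun a b : Int => decide (b < a)) (key x) K := by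
          rw [PySem.List.sorted_rev_eq_foldl_insertBy, List.foldl_append, hKdef,
              PySem.List.sorted_rev_eq_foldl_insertBy]
          rfl
        rw [if_neg hm, hofL, hadd, hsortedadd]
        apply List.flatMap_congr
        intro k _
        exact (hfilt k).symm

-- ===== VERDICT (by name: the statement is the Claim_ definition above) =====
theorem find_matching_words_spec : Claim_equal_find_matching_words := by
  intro characters words _
  show find_matching_words characters words = find_matching_words_alt characters words
  unfold find_matching_words find_matching_words_alt
  simp only []
  exact pv_bridge (fun w => PySem.Str.len w) (words.filter (fun word => pvCanFormWord word characters))
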